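-- pv_equiv track=rewrite | github.com/gregnetols/FractalMiner | Fractal.py | name_from_rules_shape
-- ===== SOURCE A (Python) =====
-- def name_from_rules_shape(vertices, rules):
--     '''Builds a string name for a fractal that is unique to the rules degree and restrictions'''
--     degrees = len(vertices)
--
--     name = str(degrees)
--     for key, current_rules in rules.items():
--         rules_id = [0 for i in range(0, degrees)]
--
--         for idx, place in enumerate(rules_id):
--             if idx in current_rules:
--                 rules_id[idx] = 1
--
--         name = name + '_' + ''.join(map(str,rules_id))
--
--     return name
-- ===== SOURCE B (Python) =====
-- def name_from_rules_shape(vertices, rules):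
--     '''Builds a string name for a fractal that is unique to the rules degree and restrictions'''
--     degrees = len(vertices)
--     parts = [str(degrees)]
--     for current_rules in rules.values():
--         rules_id = [0] * degrees
--         for r in current_rules:
--             if 0 <= r < degrees:
--                 rules_id[r] = 1
--         parts.append(''.join(map(str, rules_id)))
--     return '_'.join(parts)
-- ===== Notes on version B (the rewrite author's own statement) =====
-- stated objective: idiomatic
-- what changed: B scatters 1s into a zero vector by iterating the rule members (with a 0<=r<degrees guard) instead of scanning every index and testing membership, and joins the parts with '_'.join instead of repeated concatenation.
import Mathlib
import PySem

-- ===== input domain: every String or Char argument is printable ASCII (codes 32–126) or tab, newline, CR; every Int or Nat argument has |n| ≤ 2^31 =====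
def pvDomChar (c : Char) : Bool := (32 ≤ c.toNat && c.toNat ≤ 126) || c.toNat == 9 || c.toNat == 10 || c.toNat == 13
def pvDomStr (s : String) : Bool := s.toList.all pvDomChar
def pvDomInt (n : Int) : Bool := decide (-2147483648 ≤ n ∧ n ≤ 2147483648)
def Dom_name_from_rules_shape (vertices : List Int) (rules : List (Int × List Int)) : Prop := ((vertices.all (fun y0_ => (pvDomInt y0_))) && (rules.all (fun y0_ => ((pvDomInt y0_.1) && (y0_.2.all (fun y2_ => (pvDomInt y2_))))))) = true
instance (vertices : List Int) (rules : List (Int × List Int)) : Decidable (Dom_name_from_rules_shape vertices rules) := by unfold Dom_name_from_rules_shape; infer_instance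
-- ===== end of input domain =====

-- B builds each 0/1 row by scattering 1s at the rule members (guarded to 0 ≤ r < degrees)
-- instead of scanning every index and testing membership, and assembles the name with '_'.join;
-- objective: idiomatic (same asymptotic cost class on typical inputs).

-- ===== PORT A =====
def name_from_rules_shape (vertices : List Int) (rules : List (Int × List Int)) : String :=
  let degrees : Int := vertices.length
  let d := PySem.Dict.ofList rules
  d.items.foldl
    (fun name kv =>
      let current_rules := kv.2
      let rules_id : List Int := (PySem.List.pyRange 0 degrees 1).map (fun _ => 0)
      let rules_id :=
        (List.range rules_id.length).foldl
          (fun (acc : List Int) (idx : Nat) => if (idx : Int) ∈ current_rules then acc.set idx 1 else acc)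
          rules_id
      name ++ "_" ++ PySem.Str.join "" (rules_id.map PySem.Int.toStr))
    (PySem.Int.toStr degrees)

-- ===== PORT B =====
def name_from_rules_shape_alt (vertices : List Int) (rules : List (Int × List Int)) : String :=
  let degrees : Int := vertices.length
  let d := PySem.Dict.ofList rules
  let parts :=
    d.values.foldl
      (fun ps current_rules =>
        let rules_id :=
          current_rules.foldl
            (fun acc r => if 0 ≤ r ∧ r < degrees then acc.set r.toNat 1 else acc)
            (List.replicate degrees.toNat 0)
        ps ++ [PySem.Str.join "" (rules_id.map PySem.Int.toStr)])
      [PySem.Int.toStr degrees]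
  PySem.Str.join "_" parts

-- ===== PRECONDITION & SPEC =====
def Spec_name_from_rules_shape (vertices : List Int) (rules : List (Int × List Int)) (out : String) : Prop := out = name_from_rules_shape_alt vertices rules
instance (vertices : List Int) (rules : List (Int × List Int)) (out : String) : Decidable (Spec_name_from_rules_shape vertices rules out) := by unfold Spec_name_from_rules_shape; infer_instance

-- ===== CLAIM (what is proved, stated in full; the proofs are below) =====
def Claim_equal_name_from_rules_shape : Prop := ∀ (vertices : List Int) (rules : List (Int × List Int)), Dom_name_from_rules_shape vertices rules → Spec_name_from_rules_shape vertices rules (name_from_rules_shape vertices rules)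

-- ===== LEMMAS AND PROOFS =====

-- A's gather loop, pointwise.
theorem gfold_get (cur : List Int) : ∀ (n : Nat) (acc : List Int) (i : Nat),
    ((List.range n).foldl (fun (a : List Int) (idx : Nat) => if (idx : Int) ∈ cur then a.set idx 1 else a) acc)[i]?
      = if i < n ∧ (i : Int) ∈ cur ∧ i < acc.length then some 1 else acc[i]? := by
  intro n
  induction n with
  | zero => intro acc i; simp
  | succ n ih =>
    intro acc i
    rw [List.range_succ, List.foldl_append]
    simp only [List.foldl_cons, List.foldl_nil]
    have hlen : ∀ m (a : List Int),
        ((List.range m).foldl (fun (a : List Int) (idx : Nat) => if (idx : Int) ∈ cur then a.set idx 1 else a) a).length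
          = a.length := by
      intro m a
      induction m generalizing a with
      | zero => simp
      | succ m ih2 =>
        rw [List.range_succ, List.foldl_append]
        simp only [List.foldl_cons, List.foldl_nil]
        split_ifs <;> simp [ih2]
    by_cases hmem : (n : Int) ∈ cur
    · rw [if_pos hmem, List.getElem?_set, hlen n acc]
      by_cases hni : n = i
      · subst hni
        rw [if_pos rfl]
        by_cases hl : n < acc.length
        · rw [if_pos hl, if_pos ⟨Nat.lt_succ_self n, hmem, hl⟩]
        · rw [if_neg hl, if_neg (by intro ⟨_, _, h3⟩; omega),
            List.getElem?_eq_none (by omega)]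
      · rw [if_neg hni, ih]
        by_cases hc : i < n ∧ (i : Int) ∈ cur ∧ i < acc.length
        · rw [if_pos hc, if_pos ⟨by omega, hc.2⟩]
        · rw [if_neg hc, if_neg (by
            intro ⟨h1, h2, h3⟩
            exact hc ⟨by omega, h2, h3⟩)]
    · rw [if_neg hmem, ih]
      by_cases hc : i < n ∧ (i : Int) ∈ cur ∧ i < acc.length
      · rw [if_pos hc, if_pos ⟨by omega, hc.2⟩]
      · rw [if_neg hc, if_neg (by
          intro ⟨h1, h2, h3⟩
          rcases Nat.lt_succ_iff_lt_or_eq.mp h1 with h | h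
          · exact hc ⟨h, h2, h3⟩
          · subst h; exact hmem h2)]

-- B's scatter loop, pointwise.
theorem sfold_get (m : Int) : ∀ (cur : List Int) (acc : List Int) (i : Nat),
    (cur.foldl (fun a r => if 0 ≤ r ∧ r < m then a.set r.toNat 1 else a) acc)[i]?
      = if (i : Int) ∈ cur ∧ (i : Int) < m ∧ i < acc.length then some 1 else acc[i]? := by
  intro cur
  induction cur with
  | nil => intro acc i; simp
  | cons r rest ih =>
    intro acc i
    simp only [List.foldl_cons]
    rw [ih]
    by_cases hhead : (i : Int) = r ∧ 0 ≤ r ∧ r < m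
    · obtain ⟨hir, h0, hm⟩ := hhead
      by_cases hrest : (i : Int) ∈ rest ∧ (i : Int) < m ∧
          i < (if 0 ≤ r ∧ r < m then acc.set r.toNat 1 else acc).length
      · rw [if_pos hrest]
        rw [if_pos ⟨by simp [← hir], by omega, by
          have := hrest.2.2; simpa [h0, hm] using this⟩]
      · rw [if_neg hrest, if_pos ⟨h0, hm⟩, List.getElem?_set]
        have hrt : r.toNat = i := by omega
        rw [if_pos hrt]
        by_cases hl : i < acc.length
        · rw [hrt, if_pos hl, if_pos ⟨by simp [← hir], by omega, hl⟩]
        · rw [hrt, if_neg hl, if_neg (by intro ⟨_, _, h3⟩; omega),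
            List.getElem?_eq_none (by omega)]
    · have hacc' : (if 0 ≤ r ∧ r < m then acc.set r.toNat 1 else acc)[i]? = acc[i]? := by
        split_ifs with hg
        · rw [List.getElem?_set, if_neg (by omega)]
        · rfl
      have hlen' : (if 0 ≤ r ∧ r < m then acc.set r.toNat 1 else acc).length = acc.length := by
        split_ifs <;> simp
      rw [hlen', hacc']
      by_cases hc : (i : Int) ∈ rest ∧ (i : Int) < m ∧ i < acc.length
      · rw [if_pos hc, if_pos ⟨by simp [hc.1], hc.2⟩]
      · rw [if_neg hc, if_neg (by
          intro ⟨h1, h2, h3⟩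
          simp only [List.mem_cons] at h1
          rcases h1 with h | h
          · exact hhead ⟨h, by omega, by omega⟩
          · exact hc ⟨h, h2, h3⟩)]

-- Per rule, A's gathered row equals B's scattered row.
theorem rows_eq (m : Nat) (cur : List Int) :
    (List.range ((PySem.List.pyRange 0 (m : Int) 1).map (fun _ => (0 : Int))).length).foldl
        (fun (acc : List Int) (idx : Nat) => if (idx : Int) ∈ cur then acc.set idx 1 else acc)
        ((PySem.List.pyRange 0 (m : Int) 1).map (fun _ => (0 : Int)))
      = cur.foldl (fun acc r => if 0 ≤ r ∧ r < (m : Int) then acc.set r.toNat 1 else acc)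
          (List.replicate (m : Int).toNat 0) := by
  have hz : (PySem.List.pyRange 0 (m : Int) 1).map (fun _ => (0 : Int))
      = List.replicate (m : Int).toNat 0 := by
    rw [List.eq_replicate_iff]
    constructor
    · simp [PySem.List.length_pyRange_one]
    · intro b hb
      simp only [List.mem_map] at hb
      obtain ⟨_, _, h⟩ := hb
      exact h.symm
  rw [hz]
  have hlen : ((m : Int).toNat) = m := by omega
  apply List.ext_getElem?
  intro i
  rw [gfold_get, sfold_get]
  simp only [List.length_replicate, hlen]
  by_cases h1 : i < m ∧ (i : Int) ∈ cur
  · rw [if_pos ⟨h1.1, h1.2, h1.1⟩, if_pos ⟨h1.2, by omega, h1.1⟩]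
  · rw [if_neg (by intro ⟨a, b, _⟩; exact h1 ⟨a, b⟩),
      if_neg (by intro ⟨a, b, _⟩; exact h1 ⟨by omega, a⟩)]

-- '_' concatenation fold equals '_'.join.
theorem chars_join_absorb (sep p q : List Char) (rest : List (List Char)) :
    PySem.Chars.join sep ((p ++ sep ++ q) :: rest) = PySem.Chars.join sep (p :: q :: rest) := by
  cases rest with
  | nil => rw [PySem.Chars.join_cons_cons, PySem.Chars.join_singleton, PySem.Chars.join_singleton]
  | cons r t =>
    rw [PySem.Chars.join_cons_cons, PySem.Chars.join_cons_cons, PySem.Chars.join_cons_cons]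
    simp [List.append_assoc]

theorem join_fold (l : List String) : ∀ (h : String),
    l.foldl (fun name s => name ++ "_" ++ s) h = PySem.Str.join "_" (h :: l) := by
  induction l with
  | nil =>
    intro h
    apply String.toList_inj.mp
    rw [PySem.Str.toList_join]
    simp [PySem.Chars.join_singleton]
  | cons a t ih =>
    intro h
    simp only [List.foldl_cons]
    rw [ih]
    apply String.toList_inj.mp
    rw [PySem.Str.toList_join, PySem.Str.toList_join]
    simp only [List.map_cons]
    have := chars_join_absorb ("_" : String).toList h.toList a.toList (t.map String.toList)
    simpa using this

theorem foldl_congr_fun {α β : Type} (f g : β → α → β) (l : List α) (init : β)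
    (h : ∀ b x, f b x = g b x) : l.foldl f init = l.foldl g init := by
  induction l generalizing init with
  | nil => rfl
  | cons a t ih => simp only [List.foldl_cons, h]; exact ih _

theorem foldl_append_singleton {α : Type} (g : α → String) (l : List α) :
    ∀ (acc : List String), l.foldl (fun ps x => ps ++ [g x]) acc = acc ++ l.map g := by
  induction l with
  | nil => intro acc; simp
  | cons a t ih => intro acc; simp [ih]

-- ===== VERDICT (by name: the statement is the Claim_ definition above) =====
theorem name_from_rules_shape_spec : Claim_equal_name_from_rules_shape := by
  unfold Claim_equal_name_from_rules_shape
  intro vertices rules _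
  unfold Spec_name_from_rules_shape name_from_rules_shape name_from_rules_shape_alt
  simp only []
  set d := PySem.Dict.ofList rules with hd
  set m : Nat := vertices.length with hm
  -- rewrite B's parts fold as a map
  rw [foldl_append_singleton]
  -- B's values fold over items
  have hvals : d.values = d.items.map (·.2) := rfl
  rw [hvals]
  rw [List.map_map]
  -- A's fold: rewrite each row to B's row
  have hrow : ∀ (name : String) (kv : Int × List Int),
      (fun (name : String) (kv : Int × List Int) =>
        name ++ "_" ++ PySem.Str.join ""
          (((List.range ((PySem.List.pyRange 0 (m : Int) 1).map (fun _ => (0 : Int))).length).foldl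
            (fun (acc : List Int) (idx : Nat) => if (idx : Int) ∈ kv.2 then acc.set idx 1 else acc)
            ((PySem.List.pyRange 0 (m : Int) 1).map (fun _ => (0 : Int)))).map PySem.Int.toStr))
        name kv
      = name ++ "_" ++ PySem.Str.join ""
          ((kv.2.foldl (fun acc r => if 0 ≤ r ∧ r < (m : Int) then acc.set r.toNat 1 else acc)
            (List.replicate (m : Int).toNat 0)).map PySem.Int.toStr) := by
    intro name kv
    simp only [rows_eq m kv.2]
  calc d.items.foldl
        (fun name kv =>
          name ++ "_" ++ PySem.Str.join ""
            (((List.range ((PySem.List.pyRange 0 (m : Int) 1).map (fun _ => (0 : Int))).length).foldl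
              (fun (acc : List Int) (idx : Nat) => if (idx : Int) ∈ kv.2 then acc.set idx 1 else acc)
              ((PySem.List.pyRange 0 (m : Int) 1).map (fun _ => (0 : Int)))).map PySem.Int.toStr))
        (PySem.Int.toStr (m : Int))
      = d.items.foldl
        (fun name kv =>
          name ++ "_" ++ PySem.Str.join ""
            ((kv.2.foldl (fun acc r => if 0 ≤ r ∧ r < (m : Int) then acc.set r.toNat 1 else acc)
              (List.replicate (m : Int).toNat 0)).map PySem.Int.toStr))
        (PySem.Int.toStr (m : Int)) := by
        exact foldl_congr_fun _ _ _ _ (fun b x => hrow b x)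
    _ = (d.items.map (fun kv =>
          PySem.Str.join ""
            ((kv.2.foldl (fun acc r => if 0 ≤ r ∧ r < (m : Int) then acc.set r.toNat 1 else acc)
              (List.replicate (m : Int).toNat 0)).map PySem.Int.toStr))).foldl
          (fun name s => name ++ "_" ++ s) (PySem.Int.toStr (m : Int)) := by
        rw [List.foldl_map]
    _ = _ := by
        rw [join_fold]
        rfl
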